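-- pv_equiv track=rewrite | github.com/be4rpooh02/onlinejudge | 프로그래머스/lv0/unrated/181932. 코드 처리하기/코드 처리하기.py | solution
-- ===== SOURCE A (Python) =====
-- def solution(code):
--     mode = 0
--     answer = ""
--
--     for idx, ch in enumerate(code):
--         if(ch == '1'):
--             mode=0 if(mode) else 1
--             continue
--
--         if mode%2 == idx%2:
--             answer+=ch
--
--     return answer if(answer) else "EMPTY"
-- ===== SOURCE B (Python) =====
-- def solution(code):
--     # prefix-parity table: ones[i] = number of '1' characters strictly before index i
--     ones = [0]
--     for ch in code:
--         ones.append(ones[-1] + (ch == '1'))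
--     picked = "".join(ch for idx, ch in enumerate(code)
--                      if ch != '1' and ones[idx] % 2 == idx % 2)
--     return picked if picked else "EMPTY"
-- ===== Notes on version B (the rewrite author's own statement) =====
-- stated objective: alternative
-- what changed: Replaces the stateful toggle-and-continue loop with a prefix table of '1'-counts followed by a single stateless filtering pass over enumerate(code).
import Mathlib
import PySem

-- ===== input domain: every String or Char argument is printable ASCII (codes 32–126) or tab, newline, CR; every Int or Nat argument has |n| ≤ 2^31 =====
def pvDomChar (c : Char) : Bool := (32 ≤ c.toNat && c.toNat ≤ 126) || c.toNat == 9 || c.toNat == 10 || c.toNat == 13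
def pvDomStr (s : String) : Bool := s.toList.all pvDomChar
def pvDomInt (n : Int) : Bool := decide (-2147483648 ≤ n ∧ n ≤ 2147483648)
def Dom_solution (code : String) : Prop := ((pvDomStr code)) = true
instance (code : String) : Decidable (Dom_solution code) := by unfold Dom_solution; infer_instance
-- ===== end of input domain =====

-- B replaces A's stateful toggle loop by a prefix '1'-count table plus one stateless filtering pass (alternative decomposition, same cost).

-- ===== PORT A =====
-- stateful loop over enumerate(code): toggle mode on '1', else keep ch when mode%2 == idx%2
def solution (code : String) : String :=
  let st := (PySem.List.enumerate code.toList).foldl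
    (fun (st : Int × List Char) p =>
      if p.2 = '1' then
        ((if st.1 ≠ 0 then 0 else 1), st.2)
      else if PySem.Int.mod st.1 2 = PySem.Int.mod p.1 2 then
        (st.1, st.2 ++ [p.2])
      else st)
    ((0 : Int), ([] : List Char))
  if st.2 ≠ [] then String.ofList st.2 else "EMPTY"

-- ===== PORT B =====
-- prefix table: ones[i] = number of '1' strictly before index i
def solution_alt (code : String) : String :=
  let ones := code.toList.foldl
    (fun (acc : List Int) ch => acc ++ [PySem.List.pyGetD acc (-1) 0 + (if ch = '1' then 1 else 0)])
    [0]
  let picked := ((PySem.List.enumerate code.toList).filter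
      (fun p => p.2 != '1' && (PySem.Int.mod (PySem.List.pyGetD ones p.1 0) 2 == PySem.Int.mod p.1 2))).map (·.2)
  if picked ≠ [] then String.ofList picked else "EMPTY"

-- ===== PRECONDITION & SPEC =====
def Spec_solution (code : String) (out : String) : Prop := out = solution_alt code
instance (code : String) (out : String) : Decidable (Spec_solution code out) := by unfold Spec_solution; infer_instance

-- ===== CLAIM (what is proved, stated in full; the proofs are below) =====
def Claim_equal_solution : Prop := ∀ (code : String), Dom_solution code → Spec_solution code (solution code)

-- ===== LEMMAS AND PROOFS =====

-- common selection function: s = current index, c = number of '1' seen so far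
def pvSel (s c : Int) : List Char → List Char
  | [] => []
  | ch :: t =>
    if ch = '1' then pvSel (s + 1) (c + 1) t
    else (if PySem.Int.mod c 2 = PySem.Int.mod s 2 then [ch] else []) ++ pvSel (s + 1) c t

-- running prefix counts (values after each character), starting from count c
def pvPref (c : Int) : List Char → List Int
  | [] => []
  | ch :: t => (c + (if ch = '1' then 1 else 0)) :: pvPref (c + (if ch = '1' then 1 else 0)) t

theorem pvFoldA (t : List Char) : ∀ (s c : Int) (ans : List Char), 0 ≤ c →
    ((PySem.List.enumerate t s).foldl
      (fun (st : Int × List Char) p =>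
        if p.2 = '1' then
          ((if st.1 ≠ 0 then 0 else 1), st.2)
        else if PySem.Int.mod st.1 2 = PySem.Int.mod p.1 2 then
          (st.1, st.2 ++ [p.2])
        else st)
      (PySem.Int.mod c 2, ans)).2 = ans ++ pvSel s c t := by
  induction t with
  | nil => intro s c ans _; simp [PySem.List.enumerate_nil, pvSel]
  | cons ch t ih =>
    intro s c ans hc
    rw [PySem.List.enumerate_cons, List.foldl_cons]
    by_cases h1 : ch = '1'
    · have hm : (if PySem.Int.mod c 2 ≠ 0 then (0:Int) else 1) = PySem.Int.mod (c + 1) 2 := by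
        rw [PySem.Int.mod_eq_emod_of_pos (by omega), PySem.Int.mod_eq_emod_of_pos (by omega)]
        omega
      simp only [h1, if_pos trivial, hm, pvSel]
      exact ih (s+1) (c+1) ans (by omega)
    · have hmm : PySem.Int.mod (PySem.Int.mod c 2) 2 = PySem.Int.mod c 2 := by
        rw [PySem.Int.mod_eq_emod_of_pos (by omega), PySem.Int.mod_eq_emod_of_pos (by omega)]
        omega
      simp only [h1, if_false, hmm, pvSel]
      by_cases hc2 : PySem.Int.mod c 2 = PySem.Int.mod s 2
      · simp only [if_pos hc2]
        rw [ih (s+1) c (ans ++ [ch]) hc]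
        simp
      · simp only [if_neg hc2]
        rw [ih (s+1) c ans hc]
        simp

theorem pvBuild (t : List Char) : ∀ (acc : List Int) (x : Int),
    (t.foldl (fun (acc : List Int) ch => acc ++ [PySem.List.pyGetD acc (-1) 0 + (if ch = '1' then 1 else 0)]) (acc ++ [x]))
      = acc ++ [x] ++ pvPref x t := by
  induction t with
  | nil => intro acc x; simp [pvPref]
  | cons ch t ih =>
    intro acc x
    rw [List.foldl_cons, PySem.List.pyGetD_neg_one_append_singleton, pvPref]
    have := ih (acc ++ [x]) (x + (if ch = '1' then 1 else 0))
    simp only [List.append_assoc] at this ⊢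
    exact this

-- lookup into the prefix table: (c :: pvPref c t)[j] = c + (# of '1' in the first j chars of t)
theorem pvLookup (t : List Char) : ∀ (j : Nat) (c : Int), j < t.length + 1 →
    (c :: pvPref c t).getD j 0 = c + ((t.take j).count '1' : Int) := by
  induction t with
  | nil =>
    intro j c hj
    have : j = 0 := by simpa [Nat.lt_one_iff] using hj
    subst this; simp
  | cons ch t ih =>
    intro j c hj
    cases j with
    | zero => simp
    | succ j =>
      simp only [pvPref, List.getD_cons_succ, List.take_succ_cons, List.count_cons]
      rw [show ((c + if ch = '1' then 1 else 0) :: pvPref (c + if ch = '1' then 1 else 0) t).getD j 0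
            = (c + if ch = '1' then 1 else 0) + ((t.take j).count '1' : Int) from
          ih j _ (by simpa using hj)]
      by_cases h : ch = '1' <;> simp [h] <;> push_cast <;> ring

theorem pvFiltB (t : List Char) : ∀ (s c : Nat) (G : List Int),
    (∀ j : Nat, j < t.length → G.getD (s + j) 0 = c + ((t.take j).count '1' : Int)) →
    ((PySem.List.enumerate t (s : Int)).filter
        (fun p => p.2 != '1' && (PySem.Int.mod (PySem.List.pyGetD G p.1 0) 2 == PySem.Int.mod p.1 2))).map (·.2)
      = pvSel (s : Int) (c : Int) t := by
  induction t with
  | nil => intro s c G _; simp [PySem.List.enumerate_nil, pvSel]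
  | cons ch t ih =>
    intro s c G hG
    rw [PySem.List.enumerate_cons, List.filter_cons]
    have h0 : PySem.List.pyGetD G (s : Int) 0 = (c : Int) := by
      rw [PySem.List.pyGetD_natCast]
      have := hG 0 (by simp)
      simpa using this
    have hrec : ∀ (c' : Nat), (∀ j : Nat, j < t.length → G.getD (s + 1 + j) 0 = c' + ((t.take j).count '1' : Int)) →
        ((PySem.List.enumerate t ((s : Int) + 1)).filter
          (fun p => p.2 != '1' && (PySem.Int.mod (PySem.List.pyGetD G p.1 0) 2 == PySem.Int.mod p.1 2))).map (·.2)
        = pvSel ((s : Int) + 1) (c' : Int) t := by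
      intro c' h
      have := ih (s + 1) c' G h
      simpa [Nat.cast_add] using this
    by_cases h1 : ch = '1'
    · have hb : (ch != '1' && (PySem.Int.mod (PySem.List.pyGetD G ((s : Int)) 0) 2 == PySem.Int.mod ((s : Int)) 2)) = false := by
        simp [h1]
      rw [hb]
      simp only [Bool.false_eq_true, if_false, pvSel, h1, if_pos trivial]
      have := hrec (c + 1) (fun j hj => by
        have := hG (j + 1) (by simpa using Nat.succ_lt_succ hj)
        simpa [h1, Nat.add_comm, Nat.add_assoc, Nat.add_left_comm, add_comm, add_assoc, add_left_comm] using this)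
      rw [show ((c : Int) + 1) = ((c + 1 : Nat) : Int) by push_cast; ring]
      exact this
    · have hrest := hrec c (fun j hj => by
        have := hG (j + 1) (by simpa using Nat.succ_lt_succ hj)
        simpa [h1, Nat.add_comm, Nat.add_assoc, Nat.add_left_comm] using this)
      simp only [pvSel, if_neg h1]
      by_cases hcond : PySem.Int.mod ((c : Nat) : Int) 2 = PySem.Int.mod ((s : Nat) : Int) 2
      · have hcond' : ((c : Nat) : Int) % 2 = ((s : Nat) : Int) % 2 := by
          rw [← PySem.Int.mod_eq_emod_of_pos (by omega : (0:Int) < 2),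
              ← PySem.Int.mod_eq_emod_of_pos (by omega : (0:Int) < 2)]
          exact hcond
        have hb : (ch != '1' && (PySem.Int.mod (PySem.List.pyGetD G ((s : Int)) 0) 2 == PySem.Int.mod ((s : Int)) 2)) = true := by
          simp [h1, h0, hcond']
        rw [hb]
        simp only [if_pos trivial, List.map_cons, if_pos hcond]
        rw [hrest]; rfl
      · have hcond' : ¬ ((c : Nat) : Int) % 2 = ((s : Nat) : Int) % 2 := by
          rw [← PySem.Int.mod_eq_emod_of_pos (by omega : (0:Int) < 2),
              ← PySem.Int.mod_eq_emod_of_pos (by omega : (0:Int) < 2)]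
          exact hcond
        have hb : (ch != '1' && (PySem.Int.mod (PySem.List.pyGetD G ((s : Int)) 0) 2 == PySem.Int.mod ((s : Int)) 2)) = false := by
          simp [h1, h0, hcond']
        rw [hb]
        simp only [Bool.false_eq_true, if_false, if_neg hcond]
        exact hrest

-- ===== VERDICT (by name: the statement is the Claim_ definition above) =====
theorem solution_spec : Claim_equal_solution := by
  intro code _
  unfold Spec_solution solution solution_alt
  have hA := pvFoldA code.toList 0 0 [] (by omega)
  simp only [show PySem.Int.mod 0 2 = 0 from rfl] at hA
  have hB0 : (code.toList.foldl (fun (acc : List Int) ch => acc ++ [PySem.List.pyGetD acc (-1) 0 + (if ch = '1' then 1 else 0)]) [0])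
      = (0 : Int) :: pvPref 0 code.toList := by
    have := pvBuild code.toList [] 0
    simpa using this
  have hB := pvFiltB code.toList 0 0 ((0 : Int) :: pvPref 0 code.toList) (fun j hj => by
    have := pvLookup code.toList j 0 (by omega)
    simpa using this)
  simp only [hB0, Nat.cast_zero] at hB ⊢
  simp only [hA, List.nil_append, hB]
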